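-- pv_equiv track=rewrite | github.com/ngochoaphan2004/Hitori-puzzle-with-UI | rule.py | checkIsolation
-- ===== SOURCE A (Python) =====
-- from collections import deque
--
-- def isConnected(matrix, white_cells, start):
--     """
--     Kiểm tra xem các ô trắng có còn kết nối sau khi tô đen một ô không.
--     """
--     n = len(matrix)
--     visited = set()
--     queue = deque([start])
--     visited.add(start)
--
--     connected_count = 0
--     directions = [(-1, 0), (1, 0), (0, -1), (0, 1)]
--
--     while queue:
--         x, y = queue.popleft()
--         connected_count += 1
--
--         for dx, dy in directions:
--             nx, ny = x + dx, y + dy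
--             if (nx, ny) in white_cells and (nx, ny) not in visited:
--                 visited.add((nx, ny))
--                 queue.append((nx, ny))
--
--     return connected_count == len(white_cells)  # Tất cả ô trắng phải được kết nối
--
-- def checkIsolation(matrix, x, y):
--     """
--     Kiểm tra xem nếu tô đen ô (x, y) có làm cô lập các ô trắng không.
--     """
--     if matrix[x][y] == -1:
--         return False  # Chỉ có thể tô đen ô trắng
--
--     n = len(matrix)
--     white_cells = {(i, j) for i in range(n) for j in range(n) if matrix[i][j] != -1 and (i, j) != (x, y)}
--
--     if not white_cells:
--         return False  # Nếu không còn ô trắng nào, lưới không hợp lệ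
--
--     start = next(iter(white_cells))  # Chọn một ô trắng để bắt đầu kiểm tra
--
--     return not isConnected(matrix, white_cells, start)  # Nếu mất kết nối, trả về True (vi phạm)
-- ===== SOURCE B (Python) =====
-- def checkIsolation(matrix, x, y):
--     if matrix[x][y] == -1:
--         return False
--
--     n = len(matrix)
--     whites = [(i, j) for i in range(n) for j in range(n)
--               if matrix[i][j] != -1 and (i, j) != (x, y)]
--     if not whites:
--         return False
--
--     # union-find: merge each white cell with its right and down white neighbour,
--     # then count the distinct roots; isolation <=> more than one component
--     ws = set(whites)
--     parent = {c: c for c in whites}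
--
--     def find(c):
--         while parent[c] != c:
--             c = parent[c]
--         return c
--
--     for (i, j) in whites:
--         for nc in ((i, j + 1), (i + 1, j)):
--             if nc in ws:
--                 ra, rb = find((i, j)), find(nc)
--                 if ra != rb:
--                     parent[ra] = rb
--
--     roots = {find(c) for c in whites}
--     return len(roots) > 1
-- ===== Notes on version B (the rewrite author's own statement) =====
-- stated objective: alternative
-- what changed: Replaces A's BFS traversal (deque, visited set, reachable-count compared to the white-cell total) by a disjoint-set (union-find) structure: a parent dict over the white cells, each white cell unioned with its right and down white neighbour, and the answer is whether more than one distinct root remains.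
import Mathlib
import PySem

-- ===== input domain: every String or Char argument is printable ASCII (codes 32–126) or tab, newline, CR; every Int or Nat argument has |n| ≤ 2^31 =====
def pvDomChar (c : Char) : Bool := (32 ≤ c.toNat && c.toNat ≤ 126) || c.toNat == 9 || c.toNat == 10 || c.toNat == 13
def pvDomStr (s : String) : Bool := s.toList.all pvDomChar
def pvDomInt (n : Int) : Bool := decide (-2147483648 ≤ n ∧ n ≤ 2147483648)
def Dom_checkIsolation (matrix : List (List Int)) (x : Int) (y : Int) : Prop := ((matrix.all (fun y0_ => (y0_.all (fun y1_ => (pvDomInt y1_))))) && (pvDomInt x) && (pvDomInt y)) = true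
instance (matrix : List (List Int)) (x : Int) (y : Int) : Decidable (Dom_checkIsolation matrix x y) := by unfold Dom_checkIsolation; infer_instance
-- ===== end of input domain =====

-- B replaces A's BFS traversal (deque + visited set + reachable-count compared with
-- the white-cell total) by a disjoint-set (union-find) structure: a parent dict over
-- the white cells, a union of each white cell with its right and down white
-- neighbour, and 'more than one distinct root' as the answer (objective: alternative).

-- ===== PORT A =====
-- Python's 'while queue' loop, ported with a fuel argument (the number of white cells
-- suffices; proved below); 'next(iter(white_cells))' is ported as the first-inserted
-- element of the set — the BFS connectivity answer does not depend on the start cell.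
def pvBfsLoop (whiteCells : PySem.Set (Int × Int)) :
    Nat → List (Int × Int) → PySem.Set (Int × Int) → Int → Int
  | _, [], _, count => count
  | 0, _ :: _, _, count => count      -- fuel guard only; never reached under the invariant
  | fuel + 1, c :: queue, visited, count =>
      let count := count + 1
      let st := [((-1 : Int), (0 : Int)), (1, 0), (0, -1), (0, 1)].foldl
        (fun (st : List (Int × Int) × PySem.Set (Int × Int)) d =>
          let nc := (c.1 + d.1, c.2 + d.2)
          if PySem.Set.contains whiteCells nc && !(PySem.Set.contains st.2 nc) then
            (st.1 ++ [nc], PySem.Set.add st.2 nc)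
          else st)
        (queue, visited)
      pvBfsLoop whiteCells fuel st.1 st.2 count

def isConnected (matrix : List (List Int)) (whiteCells : PySem.Set (Int × Int))
    (start : Int × Int) : Bool :=
  let _n := matrix.length
  let visited := PySem.Set.add PySem.Set.empty start
  let count := pvBfsLoop whiteCells whiteCells.length [start] visited 0
  count == (whiteCells.length : Int)

def checkIsolation (matrix : List (List Int)) (x : Int) (y : Int) : Bool :=
  if PySem.List.pyGetD (PySem.List.pyGetD matrix x []) y 0 == -1 then false
  else
    let n : Int := (matrix.length : Int)
    let whiteCells : PySem.Set (Int × Int) := PySem.Set.ofList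
      ((PySem.List.pyRange 0 n 1).flatMap (fun i =>
        ((PySem.List.pyRange 0 n 1).filter (fun j =>
          PySem.List.pyGetD (PySem.List.pyGetD matrix i []) j 0 != -1
            && !((i, j) == (x, y)))).map (fun j => (i, j))))
    if whiteCells.isEmpty then false
    else
      let start := whiteCells.headD (0, 0)
      !(isConnected matrix whiteCells start)

-- ===== PORT B =====
-- Python B's 'while parent[c] != c: c = parent[c]' find loop; the fuel (the number of
-- white cells, i.e. of dict keys) is proved sufficient below; parent[c] is ported as
-- getD c c, exact because find is only called on keys of the dict.
def pvFind (d : PySem.Dict (Int × Int) (Int × Int)) : Nat → (Int × Int) → (Int × Int)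
  | 0, c => c
  | fuel + 1, c =>
      let p := PySem.Dict.getD d c c
      if p == c then c else pvFind d fuel p

-- Python B's 'ra, rb = find(c), find(nc); if ra != rb: parent[ra] = rb'
def pvUnion (d : PySem.Dict (Int × Int) (Int × Int)) (fuel : Nat)
    (a b : Int × Int) : PySem.Dict (Int × Int) (Int × Int) :=
  let ra := pvFind d fuel a
  let rb := pvFind d fuel b
  if ra == rb then d else PySem.Dict.insert d ra rb

def checkIsolation_alt (matrix : List (List Int)) (x : Int) (y : Int) : Bool :=
  if PySem.List.pyGetD (PySem.List.pyGetD matrix x []) y 0 == -1 then false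
  else
    let n : Int := (matrix.length : Int)
    let whites : List (Int × Int) :=
      (PySem.List.pyRange 0 n 1).flatMap (fun i =>
        ((PySem.List.pyRange 0 n 1).filter (fun j =>
          PySem.List.pyGetD (PySem.List.pyGetD matrix i []) j 0 != -1
            && !((i, j) == (x, y)))).map (fun j => (i, j)))
    if whites.isEmpty then false
    else
      let ws : PySem.Set (Int × Int) := PySem.Set.ofList whites
      let parent0 := whites.foldl (fun d c => PySem.Dict.insert d c c) PySem.Dict.empty
      let fuel := whites.length
      let parent := whites.foldl (fun d c =>
        [(c.1, c.2 + 1), (c.1 + 1, c.2)].foldl (fun d nc =>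
          if PySem.Set.contains ws nc then pvUnion d fuel c nc else d) d) parent0
      let roots : PySem.Set (Int × Int) :=
        PySem.Set.ofList (whites.map (pvFind parent fuel))
      decide (roots.length > 1)

-- ===== PRECONDITION & SPEC =====
-- Pre_ excludes exactly the inputs where the Python raises an IndexError: an invalid
-- index (x, y) into the matrix, or — when cell (x, y) is white, so the comprehension
-- over range(n) × range(n) runs — some row shorter than the number of rows.
def Pre_checkIsolation (matrix : List (List Int)) (x : Int) (y : Int) : Prop :=
  PySem.Raise.InRange matrix.length x ∧
  PySem.Raise.InRange (PySem.List.pyGetD matrix x []).length y ∧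
  (PySem.List.pyGetD (PySem.List.pyGetD matrix x []) y 0 = -1 ∨
    ∀ r ∈ matrix, matrix.length ≤ r.length)
instance (matrix : List (List Int)) (x : Int) (y : Int) : Decidable (Pre_checkIsolation matrix x y) := by unfold Pre_checkIsolation; infer_instance
def pvWitness_checkIsolation : List (List Int) × Int × Int := ([[1, 2], [-1, 3]], 0, 1)

def Spec_checkIsolation (matrix : List (List Int)) (x : Int) (y : Int) (out : Bool) : Prop := out = checkIsolation_alt matrix x y
instance (matrix : List (List Int)) (x : Int) (y : Int) (out : Bool) : Decidable (Spec_checkIsolation matrix x y out) := by unfold Spec_checkIsolation; infer_instance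

-- ===== CLAIM (what is proved, stated in full; the proofs are below) =====
def Claim_equal_checkIsolation : Prop := ∀ (matrix : List (List Int)) (x : Int) (y : Int), Dom_checkIsolation matrix x y → Pre_checkIsolation matrix x y → Spec_checkIsolation matrix x y (checkIsolation matrix x y)

-- ===== LEMMAS AND PROOFS =====

-- ---------- shared graph vocabulary ----------
def pvNbrs (c : Int × Int) : List (Int × Int) :=
  [(c.1 - 1, c.2), (c.1 + 1, c.2), (c.1, c.2 - 1), (c.1, c.2 + 1)]

def pvReach (P : Int × Int → Bool) (s c : Int × Int) : Prop :=
  Relation.ReflTransGen (fun a b => b ∈ pvNbrs a ∧ P b = true) s c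

-- the white-adjacency relation and connectivity, both endpoints white
def pvE (W : List (Int × Int)) (a b : Int × Int) : Prop :=
  a ∈ W ∧ b ∈ W ∧ b ∈ pvNbrs a

def pvConn (W : List (Int × Int)) : Int × Int → Int × Int → Prop :=
  Relation.ReflTransGen (pvE W)

theorem pvContains_eq (s : List (Int × Int)) (z : Int × Int) :
    PySem.Set.contains s z = decide (z ∈ s) := by simp [PySem.Set.contains]

theorem pvNbrs_symm {a b : Int × Int} (h : b ∈ pvNbrs a) : a ∈ pvNbrs b := by
  simp [pvNbrs, Prod.ext_iff] at h ⊢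
  omega

theorem pvE_symm (W : List (Int × Int)) {a b : Int × Int} (h : pvE W a b) : pvE W b a :=
  ⟨h.2.1, h.1, pvNbrs_symm h.2.2⟩

theorem pvConn_symm (W : List (Int × Int)) {a b : Int × Int} (h : pvConn W a b) :
    pvConn W b a := by
  induction h with
  | refl => exact Relation.ReflTransGen.refl
  | tail _ he ih =>
    exact Relation.ReflTransGen.trans (Relation.ReflTransGen.single (pvE_symm W he)) ih

-- ---------- A-side: BFS characterisation ----------
def pvExpand (P : Int × Int → Bool) :
    List (Int × Int) → List (Int × Int) → List (Int × Int) → List (Int × Int) × List (Int × Int)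
  | [], seen, work => (seen, work)
  | d :: ds, seen, work =>
      if P d && !(PySem.Set.contains seen d) then pvExpand P ds (seen ++ [d]) (work ++ [d])
      else pvExpand P ds seen work

theorem pvExpand_spec (P : Int × Int → Bool) :
    ∀ (cands seen work : List (Int × Int)), seen.Nodup →
      ∃ news, pvExpand P cands seen work = (seen ++ news, work ++ news) ∧
        (seen ++ news).Nodup ∧
        (∀ d ∈ news, d ∈ cands ∧ P d = true) ∧
        (∀ d ∈ cands, P d = true → d ∈ seen ++ news) := by
  intro cands
  induction cands with
  | nil =>
    intro seen work hnd
    exact ⟨[], by simp [pvExpand], by simpa using hnd, by simp, by simp⟩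
  | cons d ds ih =>
    intro seen work hnd
    by_cases h : (P d && !(PySem.Set.contains seen d)) = true
    · have hPd : P d = true := by simp at h; exact h.1
      have hdn : d ∉ seen := by
        simp at h; exact h.2
      have hnd' : (seen ++ [d]).Nodup := by
        simp [List.nodup_append, hnd]
        rintro a b hab rfl
        exact hdn hab
      obtain ⟨news, heq, hnd2, hmem2, hall⟩ := ih (seen ++ [d]) (work ++ [d]) hnd'
      refine ⟨d :: news, ?_, ?_, ?_, ?_⟩
      · show pvExpand P (d :: ds) seen work = _
        rw [pvExpand, if_pos h, heq]
        simp
      · simpa using hnd2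
      · intro e he
        rcases List.mem_cons.1 he with rfl | he'
        · exact ⟨List.mem_cons_self, hPd⟩
        · exact ⟨List.mem_cons_of_mem _ (hmem2 e he').1, (hmem2 e he').2⟩
      · intro e he hPe
        rcases List.mem_cons.1 he with rfl | he'
        · simp
        · have := hall e he' hPe
          simpa using this
    · have hor : P d = false ∨ d ∈ seen := by
        by_cases hPd : P d = true
        · right
          simp [hPd] at h
          exact h
        · left; simpa using hPd
      obtain ⟨news, heq, hnd2, hmem2, hall⟩ := ih seen work hnd
      refine ⟨news, ?_, hnd2, ?_, ?_⟩
      · rw [pvExpand, if_neg h, heq]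
      · intro e he
        exact ⟨List.mem_cons_of_mem _ (hmem2 e he).1, (hmem2 e he).2⟩
      · intro e he hPe
        rcases List.mem_cons.1 he with rfl | he'
        · rcases hor with h1 | h1
          · rw [hPe] at h1; cases h1
          · exact List.mem_append_left _ h1
        · exact hall e he' hPe

theorem pvSetAdd_fresh (s : List (Int × Int)) (d : Int × Int)
    (h : PySem.Set.contains s d = false) : PySem.Set.add s d = s ++ [d] := by
  have : d ∉ s := by simpa [pvContains_eq] using h
  simp [PySem.Set.add, this]

theorem pvFoldA_eq (Wq : PySem.Set (Int × Int)) (c : Int × Int) :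
    ∀ (ds : List (Int × Int)) (q : List (Int × Int)) (v : PySem.Set (Int × Int)),
      ds.foldl (fun st d =>
          let nc := (c.1 + d.1, c.2 + d.2)
          if PySem.Set.contains Wq nc && !(PySem.Set.contains st.2 nc) then
            (st.1 ++ [nc], PySem.Set.add st.2 nc)
          else st) (q, v)
        = ((pvExpand (fun z => PySem.Set.contains Wq z) (ds.map (fun d => (c.1 + d.1, c.2 + d.2))) v q).2,
           (pvExpand (fun z => PySem.Set.contains Wq z) (ds.map (fun d => (c.1 + d.1, c.2 + d.2))) v q).1) := by
  intro ds
  induction ds with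
  | nil => intro q v; rfl
  | cons d ds ih =>
    intro q v
    by_cases h : (PySem.Set.contains Wq (c.1 + d.1, c.2 + d.2) && !(PySem.Set.contains v (c.1 + d.1, c.2 + d.2))) = true
    · have h' : (c.1 + d.1, c.2 + d.2) ∈ Wq ∧ (c.1 + d.1, c.2 + d.2) ∉ v := by simpa using h
      have hc : PySem.Set.contains v (c.1 + d.1, c.2 + d.2) = false := by simp [h'.2]
      simp only [List.foldl_cons, List.map_cons, pvExpand, if_pos h, pvSetAdd_fresh _ _ hc]
      exact ih _ _
    · simp only [List.foldl_cons, List.map_cons, pvExpand, if_neg h]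
      exact ih _ _

theorem pvMapDirs (c : Int × Int) :
    [((-1 : Int), (0 : Int)), (1, 0), (0, -1), (0, 1)].map (fun d => (c.1 + d.1, c.2 + d.2))
      = pvNbrs c := by
  simp [pvNbrs, Prod.ext_iff]
  omega

theorem pvClosed_mem (P : Int × Int → Bool) (s : Int × Int) (seen : List (Int × Int))
    (hs : s ∈ seen)
    (hPs : ∀ c ∈ seen, P c = true ∧ pvReach P s c)
    (hcl : ∀ c ∈ seen, ∀ d ∈ pvNbrs c, P d = true → d ∈ seen) :
    ∀ c, c ∈ seen ↔ P c = true ∧ pvReach P s c := by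
  intro c
  constructor
  · exact hPs c
  · rintro ⟨hPc, hr⟩
    clear hPc
    induction hr with
    | refl => exact hs
    | tail hr he ih => exact hcl _ ih _ he.1 he.2

theorem pvStep_inv (Wl : List (Int × Int)) (P : Int × Int → Bool)
    (hmem : ∀ c, c ∈ Wl ↔ P c = true) (hnd : Wl.Nodup) (s : Int × Int)
    (seen rest news : List (Int × Int)) (c : Int × Int)
    (hndS : seen.Nodup) (hs : s ∈ seen)
    (hws : ∀ e, e ∈ rest ∨ e = c → e ∈ seen)
    (hPs : ∀ e ∈ seen, P e = true ∧ pvReach P s e)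
    (hclosure : ∀ e ∈ seen, ¬(e ∈ rest ∨ e = c) → ∀ d ∈ pvNbrs e, P d = true → d ∈ seen)
    (hnd2 : (seen ++ news).Nodup)
    (hnews : ∀ d ∈ news, d ∈ pvNbrs c ∧ P d = true)
    (hall : ∀ d ∈ pvNbrs c, P d = true → d ∈ seen ++ news) :
    (seen ++ news).Nodup ∧ s ∈ seen ++ news ∧
    (∀ e ∈ rest ++ news, e ∈ seen ++ news) ∧
    (∀ e ∈ seen ++ news, P e = true ∧ pvReach P s e) ∧
    (∀ e ∈ seen ++ news, e ∉ rest ++ news → ∀ d ∈ pvNbrs e, P d = true → d ∈ seen ++ news) ∧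
    (seen ++ news).length ≤ Wl.length := by
  have hcP : pvReach P s c := (hPs c (hws c (Or.inr rfl))).2
  have hPnews : ∀ e ∈ seen ++ news, P e = true ∧ pvReach P s e := by
    intro e he
    rcases List.mem_append.1 he with h1 | h1
    · exact hPs e h1
    · obtain ⟨hn1, hn2⟩ := hnews e h1
      exact ⟨hn2, Relation.ReflTransGen.tail hcP ⟨hn1, hn2⟩⟩
  refine ⟨hnd2, List.mem_append_left _ hs, ?_, hPnews, ?_, ?_⟩
  · intro e he
    rcases List.mem_append.1 he with h1 | h1
    · exact List.mem_append_left _ (hws e (Or.inl h1))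
    · exact List.mem_append_right _ h1
  · intro e he hnw
    have henews : e ∉ news := fun hx => hnw (List.mem_append_right _ hx)
    have herest : e ∉ rest := fun hx => hnw (List.mem_append_left _ hx)
    have heseen : e ∈ seen := by
      rcases List.mem_append.1 he with h1 | h1
      · exact h1
      · exact absurd h1 henews
    by_cases hec : e = c
    · subst hec
      exact fun d hd hPd => hall d hd hPd
    · intro d hd hPd
      exact List.mem_append_left _
        (hclosure e heseen (fun h => by rcases h with h | h; exact herest h; exact hec h) d hd hPd)
  · have hsub : (seen ++ news) ⊆ Wl := fun e he => (hmem e).2 (hPnews e he).1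
    exact (hnd2.subperm hsub).length_le

theorem pvBfs_run (Wl : List (Int × Int)) (P : Int × Int → Bool)
    (hmem : ∀ c, c ∈ Wl ↔ P c = true) (hnd : Wl.Nodup) (s : Int × Int) :
    ∀ (fuel : Nat) (work seen : List (Int × Int)) (count : Int),
      seen.Nodup → s ∈ seen →
      (∀ c ∈ work, c ∈ seen) →
      (∀ c ∈ seen, P c = true ∧ pvReach P s c) →
      (∀ c ∈ seen, c ∉ work → ∀ d ∈ pvNbrs c, P d = true → d ∈ seen) →
      work.length + (Wl.length - seen.length) ≤ fuel →
      count + (work.length : Int) = (seen.length : Int) →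
      ∃ S : List (Int × Int),
        pvBfsLoop Wl fuel work seen count = (S.length : Int) ∧ S.Nodup ∧
        (∀ c, c ∈ S ↔ P c = true ∧ pvReach P s c) := by
  have hPfun : (fun z => PySem.Set.contains Wl z) = P := by
    funext z
    rw [pvContains_eq]
    cases hPz : P z <;> simp [hmem, hPz]
  intro fuel
  induction fuel with
  | zero =>
    intro work seen count hndS hs hws hPs hcl hfuel hcount
    have hwork : work = [] := by
      cases work with
      | nil => rfl
      | cons a l => simp at hfuel
    subst hwork
    refine ⟨seen, ?_, hndS, pvClosed_mem P s seen hs hPs (fun c hc => hcl c hc (by simp))⟩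
    show count = _
    simp at hcount
    omega
  | succ f ih =>
    intro work seen count hndS hs hws hPs hcl hfuel hcount
    cases work with
    | nil =>
      refine ⟨seen, ?_, hndS, pvClosed_mem P s seen hs hPs (fun c hc => hcl c hc (by simp))⟩
      show count = _
      simp at hcount
      omega
    | cons c rest =>
      show ∃ S, pvBfsLoop Wl (f + 1) (c :: rest) seen count = _ ∧ _
      rw [pvBfsLoop]
      rw [pvFoldA_eq Wl c, pvMapDirs c, hPfun]
      obtain ⟨news, heq, hnd2, hnews, hall⟩ := pvExpand_spec P (pvNbrs c) seen rest hndS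
      rw [heq]
      have hws' : ∀ e, e ∈ rest ∨ e = c → e ∈ seen := by
        intro e he
        rcases he with h1 | h1
        · exact hws e (List.mem_cons_of_mem _ h1)
        · exact hws e (h1 ▸ List.mem_cons_self)
      have hclosure : ∀ e ∈ seen, ¬(e ∈ rest ∨ e = c) → ∀ d ∈ pvNbrs e, P d = true → d ∈ seen := by
        intro e he hne
        exact hcl e he (by simp [List.mem_cons]; tauto)
      obtain ⟨Hnd, Hs, Hws, HPs, Hcl, Hlen⟩ :=
        pvStep_inv Wl P hmem hnd s seen rest news c hndS hs hws' hPs hclosure hnd2 hnews hall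
      have hseenle : seen.length ≤ Wl.length := by
        have hsub : seen ⊆ Wl := fun e he => (hmem e).2 (hPs e he).1
        exact (hndS.subperm hsub).length_le
      apply ih (rest ++ news) (seen ++ news) (count + 1) Hnd Hs Hws HPs Hcl
      · simp only [List.length_append] at *
        simp at hfuel
        omega
      · simp only [List.length_append, List.length_cons] at *
        push_cast
        push_cast at hcount
        omega

-- ---------- B-side: union-find theory ----------
def pvPar (d : PySem.Dict (Int × Int) (Int × Int)) (c : Int × Int) : Int × Int :=
  PySem.Dict.getD d c c

def pvIter (d : PySem.Dict (Int × Int) (Int × Int)) : Nat → (Int × Int) → (Int × Int)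
  | 0, c => c
  | k + 1, c => pvIter d k (pvPar d c)

def pvRoot (d : PySem.Dict (Int × Int) (Int × Int)) (c : Int × Int) : Prop :=
  pvPar d c = c

-- the union-find invariant: parents stay white and connected to their child,
-- and every chain reaches a root
def pvInv (W : List (Int × Int)) (d : PySem.Dict (Int × Int) (Int × Int)) : Prop :=
  (∀ c ∈ W, pvPar d c ∈ W ∧ pvConn W c (pvPar d c)) ∧
  (∀ c ∈ W, ∃ k, pvRoot d (pvIter d k c))

theorem pvIter_add (d : PySem.Dict (Int × Int) (Int × Int)) (i j : Nat) (c : Int × Int) :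
    pvIter d (i + j) c = pvIter d j (pvIter d i c) := by
  induction i generalizing c with
  | zero => simp [pvIter]
  | succ i ih =>
      have : i + 1 + j = (i + j) + 1 := by omega
      rw [this, pvIter, pvIter, ih]

theorem pvIter_succ' (d : PySem.Dict (Int × Int) (Int × Int)) (k : Nat) (c : Int × Int) :
    pvIter d (k + 1) c = pvPar d (pvIter d k c) := by
  have := pvIter_add d k 1 c
  simpa [pvIter] using this

theorem pvIter_of_root (d : PySem.Dict (Int × Int) (Int × Int)) {r : Int × Int}
    (h : pvRoot d r) : ∀ k, pvIter d k r = r := by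
  intro k
  induction k with
  | zero => rfl
  | succ k ih => rw [pvIter_succ', ih, h]

theorem pvFind_eq (d : PySem.Dict (Int × Int) (Int × Int)) :
    ∀ (k fuel : Nat) (c : Int × Int), pvRoot d (pvIter d k c) → k ≤ fuel →
      pvFind d fuel c = pvIter d k c := by
  intro k
  induction k with
  | zero =>
    intro fuel c hr _
    simp only [pvIter] at hr ⊢
    cases fuel with
    | zero => rfl
    | succ f =>
      rw [pvFind]
      simp only [pvRoot] at hr
      simp [pvPar] at hr ⊢
      simp [hr]
  | succ k ih =>
    intro fuel c hr hle
    cases fuel with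
    | zero => omega
    | succ f =>
      rw [pvFind]
      by_cases hc : pvRoot d c
      · have h1 : pvIter d (k + 1) c = c := pvIter_of_root d hc (k + 1)
        simp only [pvRoot, pvPar] at hc
        simp [pvPar, hc, h1]
      · simp only [pvRoot, pvPar] at hc
        have hbe : (PySem.Dict.getD d c c == c) = false := by
          simpa using hc
        simp only [hbe]
        simp only [pvIter] at hr
        exact ih f (PySem.Dict.getD d c c) hr (by omega)

theorem pvIter_mem (W : List (Int × Int)) (d : PySem.Dict (Int × Int) (Int × Int))
    (hK : ∀ c ∈ W, pvPar d c ∈ W) {c : Int × Int} (hc : c ∈ W) (k : Nat) :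
    pvIter d k c ∈ W := by
  induction k generalizing c with
  | zero => exact hc
  | succ k ih => rw [pvIter]; exact ih (hK c hc)

theorem pvConn_iter (W : List (Int × Int)) (d : PySem.Dict (Int × Int) (Int × Int))
    (hInv : pvInv W d) {c : Int × Int} (hc : c ∈ W) (k : Nat) :
    pvConn W c (pvIter d k c) := by
  induction k with
  | zero => exact Relation.ReflTransGen.refl
  | succ k ih =>
    rw [pvIter_succ']
    have hm : pvIter d k c ∈ W := pvIter_mem W d (fun e he => (hInv.1 e he).1) hc k
    exact Relation.ReflTransGen.trans ih (hInv.1 _ hm).2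

-- minimal chains are duplicate-free, hence short: a root is reached within |W| steps
theorem pvShort_chain (W : List (Int × Int)) (d : PySem.Dict (Int × Int) (Int × Int))
    (hW : W.Nodup) (hK : ∀ c ∈ W, pvPar d c ∈ W) {c : Int × Int} (hc : c ∈ W)
    {k : Nat} (h : pvRoot d (pvIter d k c)) :
    ∃ k', k' < W.length ∧ pvRoot d (pvIter d k' c) ∧
      (∀ i < k', ¬ pvRoot d (pvIter d i c)) := by
  classical
  have hex : ∃ m, pvRoot d (pvIter d m c) := ⟨k, h⟩
  let k0 := Nat.find hex
  have hroot : pvRoot d (pvIter d k0 c) := Nat.find_spec hex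
  have hmin : ∀ i < k0, ¬ pvRoot d (pvIter d i c) := fun i hi => Nat.find_min hex hi
  refine ⟨k0, ?_, hroot, hmin⟩
  -- the chain 0..k0 is injective: a repeat would put a root before k0
  have hinj : ∀ i ∈ List.range (k0 + 1), ∀ j ∈ List.range (k0 + 1),
      pvIter d i c = pvIter d j c → i = j := by
    intro i hi j hj hij
    simp [List.mem_range] at hi hj
    by_contra hne
    -- wlog i < j
    rcases Nat.lt_or_ge i j with hlt | hge
    · have t := k0 - j
      have h1 : pvIter d (i + (k0 - j)) c = pvIter d k0 c := by
        rw [pvIter_add, hij, ← pvIter_add]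
        congr 1
        omega
      have : i + (k0 - j) < k0 := by omega
      exact hmin _ this (h1 ▸ hroot)
    · have hlt : j < i := by omega
      have h1 : pvIter d (j + (k0 - i)) c = pvIter d k0 c := by
        rw [pvIter_add, ← hij, ← pvIter_add]
        congr 1
        omega
      have : j + (k0 - i) < k0 := by omega
      exact hmin _ this (h1 ▸ hroot)
  have hndchain : ((List.range (k0 + 1)).map (fun i => pvIter d i c)).Nodup :=
    (List.nodup_range).map_on hinj
  have hsub : ((List.range (k0 + 1)).map (fun i => pvIter d i c)) ⊆ W := by
    intro z hz
    simp at hz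
    obtain ⟨i, _, rfl⟩ := hz
    exact pvIter_mem W d hK hc i
  have hlen := (hndchain.subperm hsub).length_le
  simp at hlen
  omega

def pvRootF (W : List (Int × Int)) (d : PySem.Dict (Int × Int) (Int × Int))
    (c : Int × Int) : Int × Int :=
  pvFind d W.length c

theorem pvRootF_spec (W : List (Int × Int)) (d : PySem.Dict (Int × Int) (Int × Int))
    (hW : W.Nodup) (hInv : pvInv W d) {c : Int × Int} (hc : c ∈ W) :
    ∃ k, k < W.length ∧ pvIter d k c = pvRootF W d c ∧ pvRoot d (pvRootF W d c) ∧
      (∀ i < k, ¬ pvRoot d (pvIter d i c)) := by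
  obtain ⟨k, hk⟩ := hInv.2 c hc
  obtain ⟨k', hk'len, hk'root, hk'min⟩ :=
    pvShort_chain W d hW (fun e he => (hInv.1 e he).1) hc hk
  have := pvFind_eq d k' W.length c hk'root (by omega)
  exact ⟨k', hk'len, this.symm, by rw [← this] at hk'root; exact hk'root, hk'min⟩

theorem pvRootF_mem (W : List (Int × Int)) (d : PySem.Dict (Int × Int) (Int × Int))
    (hW : W.Nodup) (hInv : pvInv W d) {c : Int × Int} (hc : c ∈ W) :
    pvRootF W d c ∈ W := by
  obtain ⟨k, _, hiter, _, _⟩ := pvRootF_spec W d hW hInv hc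
  rw [← hiter]
  exact pvIter_mem W d (fun e he => (hInv.1 e he).1) hc k

theorem pvConn_rootF (W : List (Int × Int)) (d : PySem.Dict (Int × Int) (Int × Int))
    (hW : W.Nodup) (hInv : pvInv W d) {c : Int × Int} (hc : c ∈ W) :
    pvConn W c (pvRootF W d c) := by
  obtain ⟨k, _, hiter, _, _⟩ := pvRootF_spec W d hW hInv hc
  rw [← hiter]
  exact pvConn_iter W d hInv hc k

theorem pvPar_insert (d : PySem.Dict (Int × Int) (Int × Int)) (ra rb z : Int × Int) :
    pvPar (PySem.Dict.insert d ra rb) z = if z = ra then rb else pvPar d z := by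
  simp [pvPar, PySem.Dict.getD_insert]

-- THE union step: the root function is updated pointwise, the invariant survives
theorem pvChain_insert (W : List (Int × Int)) (d : PySem.Dict (Int × Int) (Int × Int))
    (hW : W.Nodup) (hInv : pvInv W d) (ra rb : Int × Int)
    (hroot_ra : pvRoot d ra) (hroot_rb : pvRoot d rb) (hne : ra ≠ rb)
    {c : Int × Int} (hc : c ∈ W) :
    ∃ k', k' ≤ W.length ∧ pvRoot (PySem.Dict.insert d ra rb) (pvIter (PySem.Dict.insert d ra rb) k' c) ∧
      pvIter (PySem.Dict.insert d ra rb) k' c =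
        (if pvRootF W d c = ra then rb else pvRootF W d c) := by
  obtain ⟨k, hklen, hiter, hrootc, hmin⟩ := pvRootF_spec W d hW hInv hc
  have hroot_rb' : pvRoot (PySem.Dict.insert d ra rb) rb := by
    unfold pvRoot
    rw [pvPar_insert, if_neg (Ne.symm hne)]
    exact hroot_rb
  by_cases hr : pvRootF W d c = ra
  · -- the chain of c ran into ra: it gains one extra step to rb
    have hchain : ∀ i, i ≤ k → pvIter (PySem.Dict.insert d ra rb) i c = pvIter d i c := by
      intro i hi
      induction i with
      | zero => rfl
      | succ i ih =>
        rw [pvIter_succ', pvIter_succ', ih (by omega), pvPar_insert]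
        have hnr : pvIter d i c ≠ ra := by
          intro heq
          exact hmin i (by omega) (by rw [heq]; exact hroot_ra)
        rw [if_neg hnr]
    have h1 : pvIter (PySem.Dict.insert d ra rb) k c = ra := by
      rw [hchain k (le_refl _), hiter, hr]
    have h2 : pvIter (PySem.Dict.insert d ra rb) (k + 1) c = rb := by
      rw [pvIter_succ', h1, pvPar_insert, if_pos rfl]
    exact ⟨k + 1, by omega, by rw [h2]; exact hroot_rb', by rw [h2, if_pos hr]⟩
  · -- the chain of c avoids ra entirely and is unchanged
    have hnotra : ∀ i, i ≤ k → pvIter d i c ≠ ra := by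
      intro i hi heq
      have h1 : pvIter d k c = ra := by
        have h2 := pvIter_add d i (k - i) c
        have h3 : i + (k - i) = k := by omega
        rw [h3] at h2
        rw [h2, heq, pvIter_of_root d hroot_ra]
      exact hr (by rw [← hiter, h1])
    have hchain : ∀ i, i ≤ k → pvIter (PySem.Dict.insert d ra rb) i c = pvIter d i c := by
      intro i hi
      induction i with
      | zero => rfl
      | succ i ih =>
        rw [pvIter_succ', pvIter_succ', ih (by omega), pvPar_insert,
          if_neg (hnotra i (by omega))]
    have h1 : pvIter (PySem.Dict.insert d ra rb) k c = pvRootF W d c := by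
      rw [hchain k (le_refl _), hiter]
    refine ⟨k, by omega, ?_, by rw [h1, if_neg hr]⟩
    rw [h1]
    unfold pvRoot
    rw [pvPar_insert, if_neg hr]
    exact hrootc

theorem pvUpdate (W : List (Int × Int)) (d : PySem.Dict (Int × Int) (Int × Int))
    (hW : W.Nodup) (hInv : pvInv W d) {a b : Int × Int} (ha : a ∈ W) (hb : b ∈ W)
    (hconn : pvConn W a b) (hne : pvRootF W d a ≠ pvRootF W d b) :
    pvInv W (PySem.Dict.insert d (pvRootF W d a) (pvRootF W d b)) ∧
    (∀ c ∈ W, pvRootF W (PySem.Dict.insert d (pvRootF W d a) (pvRootF W d b)) c =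
      if pvRootF W d c = pvRootF W d a then pvRootF W d b else pvRootF W d c) := by
  have hraW : pvRootF W d a ∈ W := pvRootF_mem W d hW hInv ha
  have hrbW : pvRootF W d b ∈ W := pvRootF_mem W d hW hInv hb
  obtain ⟨_, _, _, hroot_ra, _⟩ := pvRootF_spec W d hW hInv ha
  obtain ⟨_, _, _, hroot_rb, _⟩ := pvRootF_spec W d hW hInv hb
  have hconn_ra_rb : pvConn W (pvRootF W d a) (pvRootF W d b) :=
    Relation.ReflTransGen.trans (pvConn_symm W (pvConn_rootF W d hW hInv ha))
      (Relation.ReflTransGen.trans hconn (pvConn_rootF W d hW hInv hb))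
  have hKS : ∀ c ∈ W, pvPar (PySem.Dict.insert d (pvRootF W d a) (pvRootF W d b)) c ∈ W ∧
      pvConn W c (pvPar (PySem.Dict.insert d (pvRootF W d a) (pvRootF W d b)) c) := by
    intro c hc
    rw [pvPar_insert]
    by_cases hcra : c = pvRootF W d a
    · rw [if_pos hcra]
      exact ⟨hrbW, hcra ▸ hconn_ra_rb⟩
    · rw [if_neg hcra]
      exact hInv.1 c hc
  have hC : ∀ c ∈ W, ∃ k, pvRoot (PySem.Dict.insert d (pvRootF W d a) (pvRootF W d b))
      (pvIter (PySem.Dict.insert d (pvRootF W d a) (pvRootF W d b)) k c) := by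
    intro c hc
    obtain ⟨k', _, hroot', _⟩ := pvChain_insert W d hW hInv _ _ hroot_ra hroot_rb hne hc
    exact ⟨k', hroot'⟩
  refine ⟨⟨hKS, hC⟩, ?_⟩
  intro c hc
  obtain ⟨k', hk'le, hroot', hval⟩ := pvChain_insert W d hW hInv _ _ hroot_ra hroot_rb hne hc
  have := pvFind_eq (PySem.Dict.insert d (pvRootF W d a) (pvRootF W d b)) k' W.length c hroot' hk'le
  rw [pvRootF, this, hval]

-- the edge-processing folds of the port, named for the proofs
def pvStep (W : List (Int × Int)) (d : PySem.Dict (Int × Int) (Int × Int))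
    (c : Int × Int) : PySem.Dict (Int × Int) (Int × Int) :=
  [(c.1, c.2 + 1), (c.1 + 1, c.2)].foldl (fun d nc =>
    if PySem.Set.contains (PySem.Set.ofList W) nc then pvUnion d W.length c nc else d) d

def pvMono (W : List (Int × Int)) (d d' : PySem.Dict (Int × Int) (Int × Int)) : Prop :=
  ∀ u ∈ W, ∀ v ∈ W, pvRootF W d u = pvRootF W d v → pvRootF W d' u = pvRootF W d' v

theorem pvUnion_one (W : List (Int × Int)) (hW : W.Nodup)
    (d : PySem.Dict (Int × Int) (Int × Int)) (hInv : pvInv W d)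
    {c nc : Int × Int} (hc : c ∈ W) (hnc : nc ∈ W) (hnbr : nc ∈ pvNbrs c) :
    pvInv W (pvUnion d W.length c nc) ∧ pvMono W d (pvUnion d W.length c nc) ∧
    pvRootF W (pvUnion d W.length c nc) c = pvRootF W (pvUnion d W.length c nc) nc := by
  by_cases heq : pvRootF W d c = pvRootF W d nc
  · have h0 : pvUnion d W.length c nc = d := by
      unfold pvUnion
      have : (pvFind d W.length c == pvFind d W.length nc) = true := by
        simpa [pvRootF] using heq
      simp [this]
    rw [h0]
    exact ⟨hInv, fun u _ v _ h => h, heq⟩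
  · have hconn : pvConn W c nc := Relation.ReflTransGen.single ⟨hc, hnc, hnbr⟩
    obtain ⟨hInv', hform⟩ := pvUpdate W d hW hInv hc hnc hconn heq
    have h0 : pvUnion d W.length c nc =
        PySem.Dict.insert d (pvRootF W d c) (pvRootF W d nc) := by
      unfold pvUnion
      have : (pvFind d W.length c == pvFind d W.length nc) = false := by
        simpa [pvRootF] using heq
      simp [this]
      rfl
    rw [h0]
    refine ⟨hInv', ?_, ?_⟩
    · intro u hu v hv h
      rw [hform u hu, hform v hv, h]
    · rw [hform c hc, hform nc hnc, if_pos rfl,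
        if_neg (Ne.symm heq)]

theorem pvStep_run (W : List (Int × Int)) (hW : W.Nodup) {c : Int × Int} (hc : c ∈ W)
    (d : PySem.Dict (Int × Int) (Int × Int)) (hInv : pvInv W d) :
    pvInv W (pvStep W d c) ∧ pvMono W d (pvStep W d c) ∧
    (∀ nc ∈ [(c.1, c.2 + 1), (c.1 + 1, c.2)], nc ∈ W →
      pvRootF W (pvStep W d c) c = pvRootF W (pvStep W d c) nc) := by
  have hgen : ∀ (cands : List (Int × Int)), (∀ nc ∈ cands, nc ∈ pvNbrs c) →
      ∀ d, pvInv W d →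
      pvInv W (cands.foldl (fun d nc =>
        if PySem.Set.contains (PySem.Set.ofList W) nc then pvUnion d W.length c nc else d) d) ∧
      pvMono W d (cands.foldl (fun d nc =>
        if PySem.Set.contains (PySem.Set.ofList W) nc then pvUnion d W.length c nc else d) d) ∧
      (∀ nc ∈ cands, nc ∈ W →
        pvRootF W (cands.foldl (fun d nc =>
          if PySem.Set.contains (PySem.Set.ofList W) nc then pvUnion d W.length c nc else d) d) c =
        pvRootF W (cands.foldl (fun d nc =>
          if PySem.Set.contains (PySem.Set.ofList W) nc then pvUnion d W.length c nc else d) d) nc) := by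
    intro cands
    induction cands with
    | nil => exact fun _ d hInv => ⟨hInv, fun u _ v _ h => h, by simp⟩
    | cons nc rest ih =>
      intro hcands d hInv
      simp only [List.foldl_cons]
      by_cases hw : nc ∈ W
      · have hcont : PySem.Set.contains (PySem.Set.ofList W) nc = true := by
          rw [pvContains_eq]
          simp [PySem.Set.mem_ofList]
          exact hw
        rw [if_pos hcont]
        obtain ⟨hInv1, hmono1, hmerge1⟩ :=
          pvUnion_one W hW d hInv hc hw (hcands nc List.mem_cons_self)
        obtain ⟨hInvF, hmonoF, hmergeF⟩ :=
          ih (fun z hz => hcands z (List.mem_cons_of_mem _ hz)) _ hInv1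
        refine ⟨hInvF, fun u hu v hv h => hmonoF u hu v hv (hmono1 u hu v hv h), ?_⟩
        intro z hz hzW
        rcases List.mem_cons.1 hz with rfl | hz'
        · exact hmonoF c hc z hzW hmerge1
        · exact hmergeF z hz' hzW
      · have hcont : PySem.Set.contains (PySem.Set.ofList W) nc = false := by
          rw [pvContains_eq]
          simp [PySem.Set.mem_ofList]
          exact hw
        rw [if_neg (by rw [hcont]; simp)]
        obtain ⟨hInvF, hmonoF, hmergeF⟩ :=
          ih (fun z hz => hcands z (List.mem_cons_of_mem _ hz)) d hInv
        refine ⟨hInvF, hmonoF, ?_⟩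
        intro z hz hzW
        rcases List.mem_cons.1 hz with rfl | hz'
        · exact absurd hzW hw
        · exact hmergeF z hz' hzW
  unfold pvStep
  refine hgen [(c.1, c.2 + 1), (c.1 + 1, c.2)] ?_ d hInv
  intro nc hnc
  rcases List.mem_cons.1 hnc with rfl | hnc'
  · simp [pvNbrs]
  · rcases List.mem_cons.1 hnc' with rfl | h
    · simp [pvNbrs]
    · cases h

theorem pvRun_spec (W : List (Int × Int)) (hW : W.Nodup) :
    ∀ (l : List (Int × Int)), (∀ c ∈ l, c ∈ W) →
      ∀ d, pvInv W d →
      pvInv W (l.foldl (pvStep W) d) ∧ pvMono W d (l.foldl (pvStep W) d) ∧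
      (∀ c ∈ l, ∀ nc ∈ [(c.1, c.2 + 1), (c.1 + 1, c.2)], nc ∈ W →
        pvRootF W (l.foldl (pvStep W) d) c = pvRootF W (l.foldl (pvStep W) d) nc) := by
  intro l
  induction l with
  | nil => exact fun _ d hInv => ⟨hInv, fun u _ v _ h => h, by simp⟩
  | cons c rest ih =>
    intro hl d hInv
    simp only [List.foldl_cons]
    have hc : c ∈ W := hl c List.mem_cons_self
    obtain ⟨hInv1, hmono1, hmerge1⟩ := pvStep_run W hW hc d hInv
    obtain ⟨hInvF, hmonoF, hmergeF⟩ :=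
      ih (fun z hz => hl z (List.mem_cons_of_mem _ hz)) _ hInv1
    refine ⟨hInvF, fun u hu v hv h => hmonoF u hu v hv (hmono1 u hu v hv h), ?_⟩
    intro z hz nc hnc hncW
    rcases List.mem_cons.1 hz with rfl | hz'
    · exact hmonoF z hc nc hncW (hmerge1 nc hnc hncW)
    · exact hmergeF z hz' nc hnc hncW

-- all white neighbours end up merged, so connectivity implies equal roots
theorem pvComplete (W : List (Int × Int)) (F : PySem.Dict (Int × Int) (Int × Int))
    (hmerged : ∀ c ∈ W, ∀ nc ∈ [(c.1, c.2 + 1), (c.1 + 1, c.2)], nc ∈ W →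
      pvRootF W F c = pvRootF W F nc) :
    ∀ a b, pvConn W a b → pvRootF W F a = pvRootF W F b := by
  intro a b h
  induction h with
  | refl => rfl
  | tail hr he ih =>
    rw [ih]
    obtain ⟨hu, hv, hnbr⟩ := he
    simp [pvNbrs, Prod.ext_iff] at hnbr
    rcases hnbr with ⟨h1, h2⟩ | ⟨h1, h2⟩ | ⟨h1, h2⟩ | ⟨h1, h2⟩
    · -- up neighbour: the merged down-edge of the target
      refine (hmerged _ hv _ ?_ hu).symm
      simp [Prod.ext_iff]
      omega
    · -- down neighbour: the merged down-edge of the source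
      refine hmerged _ hu _ ?_ hv
      simp [Prod.ext_iff]
      omega
    · -- left neighbour: the merged right-edge of the target
      refine (hmerged _ hv _ ?_ hu).symm
      simp [Prod.ext_iff]
      omega
    · -- right neighbour: the merged right-edge of the source
      refine hmerged _ hu _ ?_ hv
      simp [Prod.ext_iff]
      omega

theorem pvSound (W : List (Int × Int)) (hW : W.Nodup)
    (F : PySem.Dict (Int × Int) (Int × Int)) (hInv : pvInv W F)
    {a b : Int × Int} (ha : a ∈ W) (hb : b ∈ W)
    (h : pvRootF W F a = pvRootF W F b) : pvConn W a b := by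
  have h1 := pvConn_rootF W F hW hInv ha
  have h2 := pvConn_rootF W F hW hInv hb
  rw [h] at h1
  exact Relation.ReflTransGen.trans h1 (pvConn_symm W h2)

-- the initial parent dict {c: c for c in whites} is the identity
theorem pvParent0_id (l : List (Int × Int)) (z : Int × Int) :
    pvPar (l.foldl (fun d c => PySem.Dict.insert d c c) PySem.Dict.empty) z = z := by
  have hgen : ∀ (d : PySem.Dict (Int × Int) (Int × Int)), (∀ w, pvPar d w = w) →
      ∀ w, pvPar (l.foldl (fun d c => PySem.Dict.insert d c c) d) w = w := by
    induction l with
    | nil => exact fun d h => h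
    | cons c rest ih =>
      intro d h
      simp only [List.foldl_cons]
      apply ih
      intro w
      rw [pvPar_insert]
      by_cases hw : w = c
      · rw [if_pos hw, hw]
      · rw [if_neg hw]
        exact h w
  exact hgen PySem.Dict.empty (fun w => by simp [pvPar]) z

theorem pvParent0_inv (W : List (Int × Int)) :
    pvInv W (W.foldl (fun d c => PySem.Dict.insert d c c) PySem.Dict.empty) := by
  constructor
  · intro c hc
    rw [pvParent0_id]
    exact ⟨hc, Relation.ReflTransGen.refl⟩
  · intro c hc
    exact ⟨0, by unfold pvRoot pvIter; rw [pvParent0_id]⟩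

-- the white-cell list as both ports build it
def pvWhites (matrix : List (List Int)) (x y : Int) : List (Int × Int) :=
  (PySem.List.pyRange 0 (matrix.length : Int) 1).flatMap (fun i =>
    ((PySem.List.pyRange 0 (matrix.length : Int) 1).filter (fun j =>
      PySem.List.pyGetD (PySem.List.pyGetD matrix i []) j 0 != -1
        && !((i, j) == (x, y)))).map (fun j => (i, j)))

theorem pvWhites_eq_filter (matrix : List (List Int)) (x y : Int) :
    pvWhites matrix x y =
      ((PySem.List.pyRange 0 (matrix.length : Int) 1 ×ˢ
        PySem.List.pyRange 0 (matrix.length : Int) 1).filter (fun c =>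
          PySem.List.pyGetD (PySem.List.pyGetD matrix c.1 []) c.2 0 != -1
            && !(c == (x, y)))) := by
  simp [pvWhites, SProd.sprod, List.product, List.filter_flatMap, List.filter_map]
  rfl

theorem pvWhites_nodup (matrix : List (List Int)) (x y : Int) :
    (pvWhites matrix x y).Nodup := by
  rw [pvWhites_eq_filter]
  exact ((PySem.List.nodup_pyRange_one _ _).product (PySem.List.nodup_pyRange_one _ _)).filter _

-- set-size facts used for the final count comparison
theorem pvOfList_const (l : List (Int × Int)) (a : Int × Int)
    (hne : l ≠ []) (h : ∀ x ∈ l, x = a) : PySem.Set.ofList l = [a] := by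
  have hnd : (PySem.Set.ofList l : List (Int × Int)).Nodup := PySem.Set.nodup_ofList l
  have hmem : ∀ x, x ∈ (PySem.Set.ofList l : List (Int × Int)) ↔ x ∈ l := by
    intro x
    simp [PySem.Set.mem_ofList]
  have hall : ∀ x ∈ (PySem.Set.ofList l : List (Int × Int)), x = a := by
    intro x hx
    exact h x ((hmem x).1 hx)
  have hain : a ∈ (PySem.Set.ofList l : List (Int × Int)) := by
    rw [hmem]
    cases l with
    | nil => exact absurd rfl hne
    | cons u t => rw [← h u List.mem_cons_self]; exact List.mem_cons_self
  match hS : (PySem.Set.ofList l : List (Int × Int)) with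
  | [] => rw [hS] at hain; cases hain
  | [u] =>
    rw [hS] at hall
    rw [hall u List.mem_cons_self]
  | u :: v :: t =>
    rw [hS] at hall hnd
    have hu := hall u List.mem_cons_self
    have hv := hall v (List.mem_cons_of_mem _ List.mem_cons_self)
    simp [hu, hv] at hnd

theorem pvTwo_lt (S : List (Int × Int)) (a b : Int × Int)
    (ha : a ∈ S) (hb : b ∈ S) (hne : a ≠ b) : 1 < S.length := by
  match S with
  | [] => cases ha
  | [u] =>
    simp at ha hb
    rw [ha, hb] at hne
    exact absurd rfl hne
  | u :: v :: t => simp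

-- bridging A's reachability (white test on the target only) with the
-- symmetric white-adjacency connectivity
theorem pvReach_imp_conn (W : List (Int × Int)) {s c : Int × Int} (hs : s ∈ W)
    (h : pvReach (fun z => decide (z ∈ W)) s c) : c ∈ W ∧ pvConn W s c := by
  induction h with
  | refl => exact ⟨hs, Relation.ReflTransGen.refl⟩
  | tail hr he ih =>
    have hcW : _ ∈ W := of_decide_eq_true he.2
    exact ⟨hcW, Relation.ReflTransGen.tail ih.2 ⟨ih.1, hcW, he.1⟩⟩

theorem pvConn_imp_reach (W : List (Int × Int)) {s c : Int × Int}
    (h : pvConn W s c) : pvReach (fun z => decide (z ∈ W)) s c := by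
  induction h with
  | refl => exact Relation.ReflTransGen.refl
  | tail hr he ih =>
    exact Relation.ReflTransGen.tail ih ⟨he.2.2, decide_eq_true he.2.1⟩

-- ===== VERDICT (by name: the statement is the Claim_ definition above) =====
theorem checkIsolation_spec : Claim_equal_checkIsolation := by
  intro matrix x y _dom _pre
  unfold Spec_checkIsolation
  by_cases hg : (PySem.List.pyGetD (PySem.List.pyGetD matrix x []) y 0 == -1) = true
  · unfold checkIsolation checkIsolation_alt
    rw [if_pos hg, if_pos hg]
  · have hA : checkIsolation matrix x y =
        (if (PySem.Set.ofList (pvWhites matrix x y) : List (Int × Int)).isEmpty then false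
         else !(isConnected matrix (PySem.Set.ofList (pvWhites matrix x y))
            ((PySem.Set.ofList (pvWhites matrix x y)).headD (0, 0)))) := by
      unfold checkIsolation
      rw [if_neg hg]
      rfl
    have hB : checkIsolation_alt matrix x y =
        (if (pvWhites matrix x y).isEmpty then false
         else decide (1 < (PySem.Set.ofList ((pvWhites matrix x y).map
            (pvFind ((pvWhites matrix x y).foldl (pvStep (pvWhites matrix x y))
              ((pvWhites matrix x y).foldl (fun d c => PySem.Dict.insert d c c) PySem.Dict.empty))
              (pvWhites matrix x y).length)) : List (Int × Int)).length)) := by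
      unfold checkIsolation_alt
      rw [if_neg hg]
      rfl
    rw [hA, hB]
    have hnodup := pvWhites_nodup matrix x y
    have hofl : PySem.Set.ofList (pvWhites matrix x y) = pvWhites matrix x y :=
      PySem.Set.ofList_eq_self_of_nodup _ hnodup
    rw [hofl]
    cases hwe : pvWhites matrix x y with
    | nil => simp
    | cons s tl =>
      rw [hwe] at hnodup
      rw [if_neg (by simp), if_neg (by simp)]
      have hhead : (s :: tl).headD ((0 : Int), (0 : Int)) = s := rfl
      rw [hhead]
      -- ------ the A side: BFS reachable set ------
      have hmem' : ∀ c, c ∈ s :: tl ↔ (fun z => decide (z ∈ s :: tl)) c = true := by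
        intro c; simp
      have hsW : s ∈ s :: tl := List.mem_cons_self
      have hPs : ∀ c ∈ [s], (fun z => decide (z ∈ s :: tl)) c = true ∧
          pvReach (fun z => decide (z ∈ s :: tl)) s c := by
        intro c hc
        simp at hc
        subst hc
        exact ⟨by simp, Relation.ReflTransGen.refl⟩
      have hclos : ∀ c ∈ [s], c ∉ ([s] : List (Int × Int)) →
          ∀ d ∈ pvNbrs c, (fun z => decide (z ∈ s :: tl)) d = true → d ∈ [s] := by
        intro c hc hcn
        exact absurd hc hcn
      obtain ⟨SA, hSAeq, hSAnd, hSAmem⟩ :=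
        pvBfs_run (s :: tl) (fun z => decide (z ∈ s :: tl)) hmem' hnodup s
          (s :: tl).length [s] [s] 0 (by simp) (by simp) (by simp) hPs hclos
          (by simp; omega) (by simp)
      have hSAsub : SA ⊆ s :: tl := by
        intro c hc
        have := ((hSAmem c).1 hc).1
        simpa using this
      have hconn : isConnected matrix (s :: tl) s =
          ((SA.length : Int) == ((s :: tl).length : Int)) := by
        unfold isConnected
        dsimp only
        have hadd : PySem.Set.add PySem.Set.empty s = [s] := rfl
        rw [hadd, hSAeq]
      rw [hconn]
      -- ------ the B side: union-find roots ------
      have hInv0 : pvInv (s :: tl) ((s :: tl).foldl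
          (fun d c => PySem.Dict.insert d c c) PySem.Dict.empty) := pvParent0_inv _
      obtain ⟨hInvF, _, hmergedF⟩ :=
        pvRun_spec (s :: tl) hnodup (s :: tl) (fun c hc => hc) _ hInv0
      have hcomp := pvComplete (s :: tl) _ hmergedF
      have hfeq : (pvFind ((s :: tl).foldl (pvStep (s :: tl))
            ((s :: tl).foldl (fun d c => PySem.Dict.insert d c c) PySem.Dict.empty))
            (s :: tl).length)
          = pvRootF (s :: tl) ((s :: tl).foldl (pvStep (s :: tl))
            ((s :: tl).foldl (fun d c => PySem.Dict.insert d c c) PySem.Dict.empty)) := rfl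
      rw [hfeq]
      set F := (s :: tl).foldl (pvStep (s :: tl))
        ((s :: tl).foldl (fun d c => PySem.Dict.insert d c c) PySem.Dict.empty) with hF
      -- ------ compare the two booleans ------
      by_cases hall : ∀ c ∈ s :: tl, pvRootF (s :: tl) F c = pvRootF (s :: tl) F s
      · -- one component: A counts all whites, B sees a single root
        have hBval : PySem.Set.ofList ((s :: tl).map (pvRootF (s :: tl) F)) =
            [pvRootF (s :: tl) F s] := by
          apply pvOfList_const _ _ (by simp)
          intro z hz
          obtain ⟨c, hc, rfl⟩ := List.mem_map.1 hz
          exact hall c hc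
        rw [hBval]
        have hWsub : ∀ c ∈ s :: tl, c ∈ SA := by
          intro c hc
          have hconn' : pvConn (s :: tl) s c :=
            pvSound (s :: tl) hnodup F hInvF hsW hc (hall c hc).symm
          exact (hSAmem c).2 ⟨by simp [hc], pvConn_imp_reach _ hconn'⟩
        have hlen : SA.length = (s :: tl).length := by
          have h1 := (hSAnd.subperm hSAsub).length_le
          have h2 := (hnodup.subperm hWsub).length_le
          omega
        have h1 : ((SA.length : Int) == ((s :: tl).length : Int)) = true := by
          rw [beq_iff_eq]
          exact_mod_cast hlen
        rw [h1]
        simp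
      · -- several components: A misses a white cell, B sees two roots
        push_neg at hall
        obtain ⟨c, hc, hcne⟩ := hall
        have hBval : 1 < (PySem.Set.ofList ((s :: tl).map (pvRootF (s :: tl) F)) :
            List (Int × Int)).length := by
          apply pvTwo_lt _ (pvRootF (s :: tl) F c) (pvRootF (s :: tl) F s)
          · exact (PySem.Set.mem_ofList _ _).mpr (List.mem_map_of_mem hc)
          · exact (PySem.Set.mem_ofList _ _).mpr (List.mem_map_of_mem hsW)
          · exact hcne
        have hlen : SA.length ≠ (s :: tl).length := by
          intro hlen
          have hperm := (hSAnd.subperm hSAsub).perm_of_length_le (by omega)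
          have hcSA : c ∈ SA := hperm.mem_iff.2 hc
          have hreach := ((hSAmem c).1 hcSA).2
          have hconn' := (pvReach_imp_conn (s :: tl) hsW hreach).2
          exact hcne (hcomp s c hconn').symm
        have h1 : ((SA.length : Int) == ((s :: tl).length : Int)) = false := by
          rw [beq_eq_false_iff_ne]
          intro h
          exact hlen (by exact_mod_cast h)
        rw [h1]
        have h2 := decide_eq_true hBval
        simpa using h2.symm
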